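-- pv_equiv track=rewrite | github.com/gbonanato/comp_ev_group_F | src/TP/problems/queens/fitness.py | check_unfit_positions
-- ===== SOURCE A (Python) =====
-- from typing import List
--
-- def check_unfit_positions(
--     chrm: List[int],
-- ) -> List[tuple[int, int]]:
--     """
--     Check the incompatible queen positions on the soution
--     candidate. If the column distance is equal to the rows distance
--     between the queens, then the positions are considered incompatible.
--
--     Returns
--     -------
--     List[tuple[int, int]]
--         list of tuple of pairs of incompatible positions.
--     """
--     incompatible_pos = []
--     for pos, val in enumerate(chrm[:-1]):
--         for comp_pos in range(pos + 1, len(chrm)):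
--             delta_pos = comp_pos - pos
--             comp_val = chrm[comp_pos]
--             delta_val = abs(val - comp_val)
--             if delta_pos == delta_val:
--                 incompatible_pair = (pos, comp_pos)
--                 incompatible_pos.append(incompatible_pair)
--     return incompatible_pos
-- ===== SOURCE B (Python) =====
-- from typing import List
--
-- def _pairs(idxs):
--     out = []
--     while idxs:
--         x, idxs = idxs[0], idxs[1:]
--         out += [(x, y) for y in idxs]
--     return out
--
-- def check_unfit_positions(
--     chrm: List[int],
-- ) -> List[tuple[int, int]]:
--     sums = {}
--     diffs = {}
--     for pos, val in enumerate(chrm):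
--         sums[val + pos] = sums.get(val + pos, []) + [pos]
--         diffs[val - pos] = diffs.get(val - pos, []) + [pos]
--     pairs = []
--     for group in (sums, diffs):
--         for idxs in group.values():
--             pairs += _pairs(idxs)
--     pairs.sort()
--     return pairs
-- ===== Notes on version B (the rewrite author's own statement) =====
-- stated objective: faster
-- what changed: A compares every pair of positions with two nested loops; B groups positions by their two diagonal keys (val+pos and val-pos) in dicts built in one pass, emits pairs only within each group, and sorts the result.
import Mathlib
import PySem

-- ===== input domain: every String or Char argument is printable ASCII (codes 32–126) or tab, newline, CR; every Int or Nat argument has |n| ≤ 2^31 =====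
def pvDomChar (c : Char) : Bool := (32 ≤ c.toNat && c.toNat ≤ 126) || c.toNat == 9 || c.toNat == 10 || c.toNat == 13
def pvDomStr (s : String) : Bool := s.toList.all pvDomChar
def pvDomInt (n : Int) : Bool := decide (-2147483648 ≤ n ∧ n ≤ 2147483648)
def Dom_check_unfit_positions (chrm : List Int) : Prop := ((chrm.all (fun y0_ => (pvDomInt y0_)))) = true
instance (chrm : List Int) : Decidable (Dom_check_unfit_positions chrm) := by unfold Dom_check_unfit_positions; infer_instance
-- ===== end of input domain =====

-- B replaces A's all-pairs double loop by grouping positions per diagonal key (val+pos / val-pos)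
-- in two dicts, emitting pairs within each group and sorting the result (alternative algorithm; faster on inputs with few collisions).

-- ===== PORT A =====
-- literal port of A's nested loops: for pos,val in enumerate(chrm[:-1]): for comp_pos in range(pos+1, len(chrm)): …
def check_unfit_positions (chrm : List Int) : List (Int × Int) :=
  (PySem.List.enumerate (PySem.List.slice chrm none (some (-1))) 0).foldl
    (fun acc pv =>
      (PySem.List.pyRange (pv.1 + 1) (PySem.List.len chrm) 1).foldl
        (fun acc2 comp_pos =>
          if comp_pos - pv.1 = |pv.2 - PySem.List.pyGetD chrm comp_pos 0| then
            acc2 ++ [(pv.1, comp_pos)]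
          else acc2)
        acc)
    []

-- ===== PORT B =====
-- port of Source B's _pairs: while idxs: x, idxs = idxs[0], idxs[1:]; out += [(x,y) for y in idxs]
def pvPairs (out : List (Int × Int)) : List Int → List (Int × Int)
  | [] => out
  | x :: rest => pvPairs (out ++ rest.map (fun y => (x, y))) rest

def check_unfit_positions_alt (chrm : List Int) : List (Int × Int) :=
  let dicts := (PySem.List.enumerate chrm 0).foldl
    (fun st pv => (st.1.modify (pv.2 + pv.1) [] (· ++ [pv.1]),
                   st.2.modify (pv.2 - pv.1) [] (· ++ [pv.1])))
    ((PySem.Dict.empty : PySem.Dict Int (List Int)), (PySem.Dict.empty : PySem.Dict Int (List Int)))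
  let pairs := [dicts.1, dicts.2].foldl
    (fun acc g => g.values.foldl (fun acc idxs => acc ++ pvPairs [] idxs) acc) []
  PySem.List.sorted2 pairs (fun p => p.1) (fun p => p.2)

-- ===== PRECONDITION & SPEC =====
def Spec_check_unfit_positions (chrm : List Int) (out : List (Int × Int)) : Prop := out = check_unfit_positions_alt chrm
instance (chrm : List Int) (out : List (Int × Int)) : Decidable (Spec_check_unfit_positions chrm out) := by unfold Spec_check_unfit_positions; infer_instance

-- ===== CLAIM (what is proved, stated in full; the proofs are below) =====
def Claim_equal_check_unfit_positions : Prop := ∀ (chrm : List Int), Dom_check_unfit_positions chrm → Spec_check_unfit_positions chrm (check_unfit_positions chrm)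

-- ===== LEMMAS AND PROOFS =====

-- the pairs (i, j), i < j < |chrm|, whose positions attack each other along a diagonal
def pvDiag (chrm : List Int) (p : Int × Int) : Prop :=
  ∃ i j : Nat, i < j ∧ j < chrm.length ∧ p = ((i : Int), (j : Int)) ∧
    ((j : Int) - (i : Int) = |chrm.getD i 0 - chrm.getD j 0|)

-- same, relative to one diagonal-key function (key (pos, val))
def pvDiagK (key : Int × Int → Int) (chrm : List Int) (p : Int × Int) : Prop :=
  ∃ i j : Nat, i < j ∧ j < chrm.length ∧ p = ((i : Int), (j : Int)) ∧
    key ((i : Int), chrm.getD i 0) = key ((j : Int), chrm.getD j 0)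

def pvGrp (key : Int × Int → Int) (chrm : List Int) (c : Int) : List Int :=
  ((PySem.List.enumerate chrm 0).filter (fun p => key p == c)).map (fun p => p.1)

def pvPart (key : Int × Int → Int) (chrm : List Int) : List (Int × Int) :=
  (PySem.Set.ofList ((PySem.List.enumerate chrm 0).map key)).flatMap
    (fun c => pvPairs [] (pvGrp key chrm c))

def pvKeyS : Int × Int → Int := fun p => p.2 + p.1
def pvKeyD : Int × Int → Int := fun p => p.2 - p.1

-- A as a flatMap
lemma pvA_eq (chrm : List Int) :
    check_unfit_positions chrm =
      (PySem.List.enumerate chrm.dropLast 0).flatMap (fun pv =>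
        ((PySem.List.pyRange (pv.1 + 1) (PySem.List.len chrm) 1).filter
            (fun j => decide (j - pv.1 = |pv.2 - PySem.List.pyGetD chrm j 0|))).map
          (fun j => (pv.1, j))) := by
  unfold check_unfit_positions
  rw [PySem.List.slice_to_neg_one]
  have h1 := PySem.List.foldl_congr_mem (PySem.List.enumerate chrm.dropLast 0)
      (fun acc pv =>
        (PySem.List.pyRange (pv.1 + 1) (PySem.List.len chrm) 1).foldl
          (fun acc2 comp_pos =>
            if comp_pos - pv.1 = |pv.2 - PySem.List.pyGetD chrm comp_pos 0| then
              acc2 ++ [(pv.1, comp_pos)]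
            else acc2) acc)
      (fun acc pv => acc ++ ((PySem.List.pyRange (pv.1 + 1) (PySem.List.len chrm) 1).filter
          (fun j => decide (j - pv.1 = |pv.2 - PySem.List.pyGetD chrm j 0|))).map (fun j => ((pv.1 : Int), j)))
      []
      (fun acc pv _ => PySem.List.foldl_append_ite _ _ _ _)
  rw [h1, PySem.List.foldl_append_eq_flatMap]
  simp

lemma pvPairs_append (out : List (Int × Int)) (idxs : List Int) :
    pvPairs out idxs = out ++ pvPairs [] idxs := by
  induction idxs generalizing out with
  | nil => simp [pvPairs]
  | cons x rest ih =>
    rw [pvPairs, pvPairs, ih (out ++ rest.map (fun y => (x, y))),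
        ih ([] ++ rest.map (fun y => (x, y)))]
    simp

lemma pvPairs_fst_mem {p : Int × Int} {idxs : List Int} (h : p ∈ pvPairs [] idxs) : p.1 ∈ idxs := by
  induction idxs with
  | nil => simp [pvPairs] at h
  | cons x rest ih =>
    rw [pvPairs, pvPairs_append] at h
    rcases List.mem_append.1 h with h' | h'
    · simp at h'
      obtain ⟨y, _, rfl⟩ := h'
      simp
    · exact List.mem_cons_of_mem _ (ih h')

lemma mem_pvPairs {idxs : List Int} (h : idxs.Pairwise (· < ·)) (p : Int × Int) :
    p ∈ pvPairs [] idxs ↔ p.1 ∈ idxs ∧ p.2 ∈ idxs ∧ p.1 < p.2 := by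
  induction idxs with
  | nil => simp [pvPairs]
  | cons x rest ih =>
    have hx : ∀ y ∈ rest, x < y := fun y hy => List.rel_of_pairwise_cons h hy
    rw [pvPairs, pvPairs_append]
    constructor
    · intro hm
      rcases List.mem_append.1 hm with h' | h'
      · simp at h'
        obtain ⟨y, hy, rfl⟩ := h'
        exact ⟨by simp, by simp [hy], hx y hy⟩
      · obtain ⟨h1, h2, h3⟩ := (ih (List.pairwise_cons.1 h).2).1 h'
        exact ⟨List.mem_cons_of_mem _ h1, List.mem_cons_of_mem _ h2, h3⟩
    · rintro ⟨h1, h2, h3⟩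
      rcases List.mem_cons.1 h1 with e1 | e1
      · rcases List.mem_cons.1 h2 with e2 | e2
        · omega
        · refine List.mem_append.2 (Or.inl ?_)
          simp only [List.nil_append, List.mem_map]
          exact ⟨p.2, e2, by rw [← e1]⟩
      · rcases List.mem_cons.1 h2 with e2 | e2
        · exact absurd (hx p.1 e1) (by omega)
        · exact List.mem_append.2 (Or.inr ((ih (List.pairwise_cons.1 h).2).2 ⟨e1, e2, h3⟩))

lemma nodup_pvPairs {idxs : List Int} (h : idxs.Pairwise (· < ·)) :
    (pvPairs [] idxs).Nodup := by
  induction idxs with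
  | nil => simp [pvPairs]
  | cons x rest ih =>
    have hx : ∀ y ∈ rest, x < y := fun y hy => List.rel_of_pairwise_cons h hy
    have hrest := (List.pairwise_cons.1 h).2
    rw [pvPairs, pvPairs_append, List.nil_append, List.nodup_append]
    refine ⟨?_, ih hrest, ?_⟩
    · refine List.Nodup.map ?_ (hrest.imp (fun {a b} hab => ne_of_lt hab))
      intro a b hab
      simpa using hab
    · intro a ha b hb hab
      subst hab
      simp only [List.mem_map] at ha
      obtain ⟨y, hy, rfl⟩ := ha
      have := pvPairs_fst_mem hb
      simp at this
      exact absurd (hx x this) (by omega)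

lemma pvPairwise_pyRange (a b : Int) :
    (PySem.List.pyRange a b 1).Pairwise (· < ·) := by
  rw [PySem.List.pyRange_of_pos a b (by norm_num)]
  exact List.Pairwise.map _ (fun x y hxy => by omega) List.pairwise_lt_range

lemma pairwise_pvGrp (key : Int × Int → Int) (chrm : List Int) (c : Int) :
    (pvGrp key chrm c).Pairwise (· < ·) := by
  unfold pvGrp
  exact List.Pairwise.map _ (fun a b h => h)
    (List.Pairwise.filter _ (PySem.List.pairwise_lt_enumerate chrm 0))

lemma mem_pvGrp (key : Int × Int → Int) (chrm : List Int) (c : Int) (x : Int) :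
    x ∈ pvGrp key chrm c ↔
      ∃ k : Nat, k < chrm.length ∧ x = (k : Int) ∧ key ((k : Int), chrm.getD k 0) = c := by
  unfold pvGrp
  constructor
  · intro hm
    simp only [List.mem_map, List.mem_filter, PySem.List.mem_enumerate_iff] at hm
    obtain ⟨p, ⟨⟨k, hk, rfl⟩, hkey⟩, rfl⟩ := hm
    refine ⟨k, hk, by simp, ?_⟩
    have hg : chrm.getD k 0 = chrm[k] := List.getD_eq_getElem _ _ hk
    rw [hg]
    simpa using beq_iff_eq.1 hkey
  · rintro ⟨k, hk, rfl, hkey⟩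
    simp only [List.mem_map, List.mem_filter, PySem.List.mem_enumerate_iff]
    refine ⟨((k : Int), chrm[k]), ⟨⟨k, hk, by simp⟩, ?_⟩, rfl⟩
    have hg : chrm.getD k 0 = chrm[k] := List.getD_eq_getElem _ _ hk
    rw [hg] at hkey
    exact beq_iff_eq.2 hkey

lemma mem_pvPart (key : Int × Int → Int) (chrm : List Int) (p : Int × Int) :
    p ∈ pvPart key chrm ↔ pvDiagK key chrm p := by
  unfold pvPart pvDiagK
  simp only [List.mem_flatMap]
  constructor
  · rintro ⟨c, _, hp⟩
    obtain ⟨h1, h2, h3⟩ := (mem_pvPairs (pairwise_pvGrp key chrm c) p).1 hp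
    obtain ⟨i, hi, e1, k1⟩ := (mem_pvGrp key chrm c p.1).1 h1
    obtain ⟨j, hj, e2, k2⟩ := (mem_pvGrp key chrm c p.2).1 h2
    refine ⟨i, j, ?_, hj, ?_, ?_⟩
    · rw [e1, e2] at h3; exact_mod_cast h3
    · rw [← e1, ← e2]
    · rw [k1, k2]
  · rintro ⟨i, j, hij, hj, rfl, hkey⟩
    refine ⟨key ((i : Int), chrm.getD i 0), ?_, ?_⟩
    · rw [PySem.Set.mem_ofList]
      simp only [List.mem_map, PySem.List.mem_enumerate_iff]
      refine ⟨((i : Int), chrm[i]'(by omega)), ⟨i, by omega, by simp⟩, ?_⟩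
      rw [List.getD_eq_getElem _ _ (by omega : i < chrm.length)]
    · rw [mem_pvPairs (pairwise_pvGrp key chrm _)]
      refine ⟨?_, ?_, by show (i : Int) < (j : Int); exact_mod_cast hij⟩
      · exact (mem_pvGrp key chrm _ _).2 ⟨i, by omega, rfl, rfl⟩
      · exact (mem_pvGrp key chrm _ _).2 ⟨j, hj, rfl, hkey.symm⟩

lemma nodup_pvPart (key : Int × Int → Int) (chrm : List Int) :
    (pvPart key chrm).Nodup := by
  unfold pvPart
  rw [List.flatMap_def, List.nodup_flatten]
  constructor
  · intro l hl
    simp only [List.mem_map] at hl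
    obtain ⟨c, _, rfl⟩ := hl
    exact nodup_pvPairs (pairwise_pvGrp key chrm c)
  · refine List.Pairwise.map _ ?_ (PySem.Set.nodup_ofList _)
    intro c₁ c₂ hne p hp1 hp2
    obtain ⟨k₁, _, e₁, hc₁⟩ := (mem_pvGrp key chrm c₁ p.1).1 (pvPairs_fst_mem hp1)
    obtain ⟨k₂, _, e₂, hc₂⟩ := (mem_pvGrp key chrm c₂ p.1).1 (pvPairs_fst_mem hp2)
    have : k₁ = k₂ := by rw [e₁] at e₂; exact_mod_cast e₂
    subst this
    exact hne (hc₁ ▸ hc₂ ▸ rfl)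

-- each dict's values, flattened through pvPairs, are pvPart of its key function
lemma pvDict_flat (chrm : List Int) (key : Int × Int → Int) :
    ((((PySem.List.enumerate chrm 0).foldl
        (fun d pv => d.modify (key pv) [] (· ++ [pv.1]))
        (PySem.Dict.empty : PySem.Dict Int (List Int))).values).flatMap (pvPairs []))
      = pvPart key chrm := by
  set d := (PySem.List.enumerate chrm 0).foldl
      (fun d pv => d.modify (key pv) [] (· ++ [pv.1]))
      (PySem.Dict.empty : PySem.Dict Int (List Int)) with hd
  have hnd : d.keys.Nodup :=
    PySem.Dict.nodup_keys_foldl_modify_key _ key [] (fun _ pv v => v ++ [pv.1]) _ (by simp)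
  have hkeys : d.keys = PySem.Set.ofList ((PySem.List.enumerate chrm 0).map key) := by
    have h := PySem.Dict.keys_foldl_modify_key (PySem.List.enumerate chrm 0) key []
      (fun _ pv v => v ++ [pv.1]) (PySem.Dict.empty : PySem.Dict Int (List Int))
    rw [PySem.Dict.keys_empty, PySem.Set.update_nil_left] at h
    exact h
  have hgetD : ∀ c, d.getD c [] = pvGrp key chrm c := by
    intro c
    have h1 : d = ((PySem.List.enumerate chrm 0).map (fun p => (key p, p.1))).foldl
        (fun d q => d.modify q.1 [] (· ++ [q.2])) PySem.Dict.empty := by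
      rw [List.foldl_map]
    rw [h1, PySem.Dict.getD_foldl_modify_append, PySem.Dict.getD_empty,
        List.filter_map, List.map_map]
    unfold pvGrp
    rfl
  rw [PySem.Dict.values_eq_map_keys d hnd [], List.flatMap_map, hkeys]
  unfold pvPart
  simp only [hgetD]

-- B's pair list before sorting is pvPart pvKeyS ++ pvPart pvKeyD
lemma pvB_eq (chrm : List Int) :
    check_unfit_positions_alt chrm =
      PySem.List.sorted2 (pvPart pvKeyS chrm ++ pvPart pvKeyD chrm) (fun p => p.1) (fun p => p.2) := by
  unfold pvKeyS pvKeyD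
  simp only [check_unfit_positions_alt]
  rw [PySem.List.foldl_prod_mk
      (f := fun (d : PySem.Dict Int (List Int)) (pv : Int × Int) => d.modify (pv.2 + pv.1) [] (· ++ [pv.1]))
      (g := fun (d : PySem.Dict Int (List Int)) (pv : Int × Int) => d.modify (pv.2 - pv.1) [] (· ++ [pv.1]))]
  simp only [List.foldl_cons, List.foldl_nil]
  rw [PySem.List.foldl_append_eq_flatMap (pvPairs []), PySem.List.foldl_append_eq_flatMap (pvPairs [])]
  rw [pvDict_flat chrm (fun pv => pv.2 + pv.1), pvDict_flat chrm (fun pv => pv.2 - pv.1)]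
  simp

lemma pvSorted2_eq_sorted_toLex (xs : List (Int × Int)) :
    PySem.List.sorted2 xs (fun p => p.1) (fun p => p.2) =
      PySem.List.sorted xs (fun p => toLex p) := by
  rw [PySem.List.sorted_eq_foldl_insertBy]
  simp only [PySem.List.sorted2, Bool.false_eq_true, if_false]
  have hbe : (fun a b : Int × Int =>
      (decide (a.1 < b.1) || (!decide (b.1 < a.1) && decide (a.2 < b.2)))) =
      (fun a b : Int × Int => decide (toLex a < toLex b)) := by
    funext a b
    rcases lt_trichotomy a.1 b.1 with h | h | h
    · simp [Prod.Lex.lt_iff, h, asymm h]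
    · simp [Prod.Lex.lt_iff, h]
    · simp [Prod.Lex.lt_iff, h, asymm h, ne_of_gt h]
  rw [hbe]

lemma mem_pvA (chrm : List Int) (p : Int × Int) :
    p ∈ check_unfit_positions chrm ↔ pvDiag chrm p := by
  rw [pvA_eq, List.mem_flatMap]
  unfold pvDiag
  constructor
  · rintro ⟨pv, hpv, hp⟩
    rw [PySem.List.mem_enumerate_iff] at hpv
    obtain ⟨k, hk, rfl⟩ := hpv
    simp only [List.mem_map, List.mem_filter, zero_add] at hp
    obtain ⟨j, ⟨hjr, hcond⟩, rfl⟩ := hp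
    rw [PySem.List.mem_pyRange_one] at hjr
    have hlen : chrm.dropLast.length = chrm.length - 1 := List.length_dropLast
    have hj0 : 0 ≤ j := by omega
    have hjlen : j < (chrm.length : Int) := by
      have := hjr.2
      simpa [PySem.List.len] using this
    lift j to ℕ using hj0 with jn
    refine ⟨k, jn, by exact_mod_cast hjr.1, by exact_mod_cast hjlen, by simp, ?_⟩
    rw [decide_eq_true_eq] at hcond
    rw [List.getElem_dropLast,
        PySem.List.pyGetD_eq_getElem chrm 0 (by omega) (by exact_mod_cast hjlen)] at hcond
    rw [List.getD_eq_getElem _ _ (show k < chrm.length by omega),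
        List.getD_eq_getElem _ _ (show jn < chrm.length by exact_mod_cast hjlen)]
    simpa using hcond
  · rintro ⟨i, j, hij, hj, rfl, hd⟩
    have hi' : i < chrm.dropLast.length := by rw [List.length_dropLast]; omega
    refine ⟨((i : Int), chrm.dropLast[i]), ?_, ?_⟩
    · rw [PySem.List.mem_enumerate_iff]
      exact ⟨i, hi', by simp⟩
    · simp only [List.mem_map, List.mem_filter]
      refine ⟨(j : Int), ⟨?_, ?_⟩, rfl⟩
      · rw [PySem.List.mem_pyRange_one]
        constructor
        · exact_mod_cast hij
        · simpa [PySem.List.len] using (show ((j : Int)) < (chrm.length : Int) by exact_mod_cast hj)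
      · rw [decide_eq_true_eq]
        rw [List.getElem_dropLast,
            PySem.List.pyGetD_eq_getElem chrm 0 (by omega) (by exact_mod_cast hj)]
        rw [List.getD_eq_getElem _ _ (show i < chrm.length by omega),
            List.getD_eq_getElem _ _ hj] at hd
        simpa using hd

lemma pairwise_pvA (chrm : List Int) :
    (check_unfit_positions chrm).Pairwise
      (fun a b => (toLex (a : Int × Int)) < (toLex (b : Int × Int))) := by
  rw [pvA_eq, List.pairwise_flatMap]
  constructor
  · intro pv _
    refine List.Pairwise.map _ (fun a b hab => ?_) ((pvPairwise_pyRange _ _).filter _)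
    rw [Prod.Lex.lt_iff]
    exact Or.inr ⟨rfl, hab⟩
  · refine (PySem.List.pairwise_lt_enumerate _ _).imp ?_
    intro a b hab x hx y hy
    simp only [List.mem_map] at hx hy
    obtain ⟨jx, _, rfl⟩ := hx
    obtain ⟨jy, _, rfl⟩ := hy
    rw [Prod.Lex.lt_iff]
    exact Or.inl hab

lemma pvDiag_iff (chrm : List Int) (p : Int × Int) :
    pvDiag chrm p ↔ (pvDiagK pvKeyS chrm p ∨ pvDiagK pvKeyD chrm p) := by
  unfold pvDiag pvDiagK pvKeyS pvKeyD
  constructor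
  · rintro ⟨i, j, hij, hj, rfl, habs⟩
    rcases (abs_eq (show (0 : Int) ≤ (j : Int) - (i : Int) by omega)).1 habs.symm with h | h
    · exact Or.inl ⟨i, j, hij, hj, rfl, by simp only []; omega⟩
    · exact Or.inr ⟨i, j, hij, hj, rfl, by simp only []; omega⟩
  · rintro (⟨i, j, hij, hj, rfl, hk⟩ | ⟨i, j, hij, hj, rfl, hk⟩) <;>
      refine ⟨i, j, hij, hj, rfl, ?_⟩ <;> simp only [] at hk
    · have h : chrm.getD i 0 - chrm.getD j 0 = (j : Int) - (i : Int) := by omega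
      rw [h, abs_of_nonneg (by omega)]
    · have h : chrm.getD i 0 - chrm.getD j 0 = -((j : Int) - (i : Int)) := by omega
      rw [h, abs_neg, abs_of_nonneg (by omega)]

lemma pvDiagK_not_both (chrm : List Int) (p : Int × Int) :
    pvDiagK pvKeyS chrm p → pvDiagK pvKeyD chrm p → False := by
  unfold pvDiagK pvKeyS pvKeyD
  rintro ⟨i, j, hij, hj, rfl, h1⟩ ⟨i', j', hij', hj', he, h2⟩
  have hii : i = i' ∧ j = j' := by
    rw [Prod.ext_iff] at he
    obtain ⟨h1', h2'⟩ := he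
    simp only [] at h1' h2'
    exact ⟨by exact_mod_cast h1', by exact_mod_cast h2'⟩
  obtain ⟨rfl, rfl⟩ := hii
  simp only [] at h1 h2
  omega

-- ===== VERDICT (by name: the statement is the Claim_ definition above) =====
theorem check_unfit_positions_spec : Claim_equal_check_unfit_positions := by
  intro chrm _
  unfold Spec_check_unfit_positions
  rw [pvB_eq, pvSorted2_eq_sorted_toLex]
  refine (PySem.List.sorted_eq_of_perm_of_pairwise_lt _ _ _ ?_ (pairwise_pvA chrm)).symm
  have hnodupA : (check_unfit_positions chrm).Nodup :=
    (pairwise_pvA chrm).imp (fun h => ne_of_lt h)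
  have hnodupB : (pvPart pvKeyS chrm ++ pvPart pvKeyD chrm).Nodup := by
    rw [List.nodup_append]
    refine ⟨nodup_pvPart _ _, nodup_pvPart _ _, ?_⟩
    intro a ha b hb hab
    subst hab
    exact pvDiagK_not_both chrm a ((mem_pvPart _ _ _).1 ha) ((mem_pvPart _ _ _).1 hb)
  rw [List.perm_ext_iff_of_nodup hnodupA hnodupB]
  intro p
  rw [mem_pvA, List.mem_append, mem_pvPart, mem_pvPart, pvDiag_iff]
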